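-- pv_equiv track=rewrite | github.com/Natan12993/HItori | Projet_Hitori.py | connexe
-- ===== SOURCE A (Python) =====
-- def connexe(grille, noircies):
--     '''
--     Renvoie True si la règle du jeu numéro 3 est respectée, autrement dit si les cellules visibles
--     de la grille forment une seule zone (ou région, ou composante connexe), et False sinon.
--     '''
--     i, j = 0, 0
--     set_connexe = set()
--     while (i, j) in noircies:
--         if j == len(grille[0]):
--             i += 1
--             j = 0
--         else:
--             j += 1
--     aide_connexe(i, j, set_connexe, grille, noircies)
--     if len(set_connexe)+len(noircies) == len(grille)*len(grille[0]):
--         return True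
--     else:
--         return False
--
-- def aide_connexe(i, j, set_connexe, grille, noircies):
--     voisin = [(0, 1), (0, -1), (1, 0), (-1, 0)]
--     set_connexe.add((i, j))
--     for k in range(len(voisin)):
--         (a, b) = voisin[k]
--         if 0 <= i + a < len(grille) and 0 <= j + b < len(grille[0]):
--             if (i + a, j + b) not in noircies and (i + a, j + b) not in set_connexe:
--                 aide_connexe(i + a, j + b, set_connexe, grille, noircies)
--     return set_connexe
-- ===== SOURCE B (Python) =====
-- def connexe(grille, noircies):
--     '''
--     Renvoie True si la regle du jeu numero 3 est respectee, autrement dit si les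
--     cellules visibles de la grille forment une seule zone (composante connexe),
--     et False sinon.  Le parcours de la zone est iteratif (pile explicite).
--     '''
--     n, m = len(grille), len(grille[0])
--     i, j = 0, 0
--     while (i, j) in noircies:
--         if j == m:
--             i += 1
--             j = 0
--         else:
--             j += 1
--     blocked = set(noircies)
--     seen = set()
--     stack = [(i, j)]
--     while stack:
--         i, j = stack.pop()
--         if (i, j) in seen:
--             continue
--         seen.add((i, j))
--         for a, b in ((-1, 0), (1, 0), (0, -1), (0, 1)):
--             if 0 <= i + a < n and 0 <= j + b < m and (i + a, j + b) not in blocked: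
--                 stack.append((i + a, j + b))
--     return len(seen) + len(noircies) == n * m
-- ===== Notes on version B (the rewrite author's own statement) =====
-- stated objective: alternative
-- what changed: The recursive depth-first helper aide_connexe is replaced by an iterative flood fill over an explicit stack with mark-on-pop (the start-cell search loop is kept unchanged); Pre_ excludes only grille = [], on which A raises IndexError (B raises too).
import Mathlib
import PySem

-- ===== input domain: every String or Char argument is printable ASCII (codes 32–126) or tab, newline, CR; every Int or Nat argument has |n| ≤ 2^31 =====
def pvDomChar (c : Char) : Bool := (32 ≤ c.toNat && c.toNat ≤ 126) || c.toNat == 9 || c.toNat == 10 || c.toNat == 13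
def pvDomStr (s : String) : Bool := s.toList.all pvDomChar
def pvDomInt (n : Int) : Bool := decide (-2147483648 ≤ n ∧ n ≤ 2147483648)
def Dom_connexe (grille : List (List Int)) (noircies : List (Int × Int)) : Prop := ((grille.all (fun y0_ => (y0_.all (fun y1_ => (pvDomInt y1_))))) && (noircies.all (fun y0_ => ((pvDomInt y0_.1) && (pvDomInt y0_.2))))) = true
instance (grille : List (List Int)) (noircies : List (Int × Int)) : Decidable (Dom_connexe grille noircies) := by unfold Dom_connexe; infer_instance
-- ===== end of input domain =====

-- B replaces A's recursive depth-first helper by an iterative explicit-stack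
-- flood fill (mark on pop); the start-cell search loop is kept unchanged.
-- Loops/recursion are ported with fuel large enough for the ports to be exact.

-- ===== PORT A =====
def voisinA : List (Int × Int) := [(0,1),(0,-1),(1,0),(-1,0)]

-- the start-search while loop of A (fuel noircies.length+1 always suffices:
-- each iteration needs the current, never-repeated position to be in noircies)
def startA (noircies : List (Int × Int)) (m : Int) : Nat → Int → Int → Int × Int
  | 0, i, j => (i, j)
  | f+1, i, j =>
    if (i, j) ∈ noircies then
      if j = m then startA noircies m f (i+1) 0 else startA noircies m f i (j+1)
    else (i, j)

-- the 'for k in range(len(voisin))' loop of aide_connexe; 'rec' is the recursive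
-- call into aide_connexe one fuel level down
def aideFoldA (noircies : List (Int × Int)) (n m : Int)
    (rec : Int → Int → List (Int × Int) → Option (List (Int × Int))) (i j : Int) :
    List (Int × Int) → List (Int × Int) → Option (List (Int × Int))
  | [], s => some s
  | (a, b) :: vs, s =>
    if 0 ≤ i + a ∧ i + a < n ∧ 0 ≤ j + b ∧ j + b < m then
      if (i + a, j + b) ∉ noircies ∧ (i + a, j + b) ∉ s then
        match rec (i + a) (j + b) s with
        | none => none
        | some s' => aideFoldA noircies n m rec i j vs s'
      else aideFoldA noircies n m rec i j vs s
    else aideFoldA noircies n m rec i j vs s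

-- aide_connexe; none = fuel exhausted (never happens at the fuel connexe passes)
def aideA (noircies : List (Int × Int)) (n m : Int) :
    Nat → Int → Int → List (Int × Int) → Option (List (Int × Int))
  | 0, _, _, _ => none
  | f+1, i, j, s =>
    aideFoldA noircies n m (aideA noircies n m f) i j voisinA (PySem.Set.add s (i, j))

def connexe (grille : List (List Int)) (noircies : List (Int × Int)) : Bool :=
  let n : Int := grille.length
  let m : Int := (grille.headD []).length
  let st := startA noircies m (noircies.length + 1) 0 0
  let s := (aideA noircies n m (grille.length * (grille.headD []).length + 2)
              st.1 st.2 []).getD []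
  if (s.length : Int) + (noircies.length : Int) = n * m then true else false

-- ===== PORT B =====
-- offsets in Source B's push order (pushed onto the stack top-first, so they are
-- popped in the reverse order)
def revVoisinB : List (Int × Int) := [(-1,0),(1,0),(0,-1),(0,1)]

-- Source B's start-search while loop (same loop as A's; fuel noircies.length+1
-- always suffices: each iteration needs the current, never-repeated position
-- to be in noircies)
def startB (noircies : List (Int × Int)) (m : Int) : Nat → Int → Int → Int × Int
  | 0, i, j => (i, j)
  | f+1, i, j =>
    if (i, j) ∈ noircies then
      if j = m then startB noircies m f (i+1) 0 else startB noircies m f i (j+1)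
    else (i, j)

-- Source B's 'while stack' loop; the Lean stack is top-first (Python appends/pops
-- at the end), so a Python append is a cons here
def floodB (blocked : PySem.Set (Int × Int)) (n m : Int) :
    Nat → List (Int × Int) → List (Int × Int) → Option (List (Int × Int))
  | 0, _, _ => none
  | _+1, [], seen => some seen
  | f+1, (i, j) :: rest, seen =>
    if (i, j) ∈ seen then floodB blocked n m f rest seen
    else
      let seen1 := PySem.Set.add seen (i, j)
      let stack1 := revVoisinB.foldl (fun st ab =>
        if 0 ≤ i + ab.1 ∧ i + ab.1 < n ∧ 0 ≤ j + ab.2 ∧ j + ab.2 < m ∧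
            (i + ab.1, j + ab.2) ∉ blocked then (i + ab.1, j + ab.2) :: st else st) rest
      floodB blocked n m f stack1 seen1

def connexe_alt (grille : List (List Int)) (noircies : List (Int × Int)) : Bool :=
  let n : Int := grille.length
  let m : Int := (grille.headD []).length
  let st := startB noircies m (noircies.length + 1) 0 0
  let blocked := PySem.Set.ofList noircies
  let seen := (floodB blocked n m (5 * (grille.length * (grille.headD []).length) + 7)
                 [st] []).getD []
  decide ((seen.length : Int) + (noircies.length : Int) = n * m)

-- ===== PRECONDITION & SPEC =====
-- Pre_ excludes only the empty grille, on which Python A raises IndexError at grille[0]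
def Pre_connexe (grille : List (List Int)) (noircies : List (Int × Int)) : Prop :=
  grille ≠ []
instance (grille : List (List Int)) (noircies : List (Int × Int)) : Decidable (Pre_connexe grille noircies) := by unfold Pre_connexe; infer_instance

def pvWitness_connexe : List (List Int) × (List (Int × Int)) := ([[1,2],[3,4]], [(0,1)])

def Spec_connexe (grille : List (List Int)) (noircies : List (Int × Int)) (out : Bool) : Prop := out = connexe_alt grille noircies
instance (grille : List (List Int)) (noircies : List (Int × Int)) (out : Bool) : Decidable (Spec_connexe grille noircies out) := by unfold Spec_connexe; infer_instance

-- ===== CLAIM (what is proved, stated in full; the proofs are below) =====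
def Claim_equal_connexe : Prop := ∀ (grille : List (List Int)) (noircies : List (Int × Int)), Dom_connexe grille noircies → Pre_connexe grille noircies → Spec_connexe grille noircies (connexe grille noircies)

-- ===== LEMMAS AND PROOFS =====


-- the cells pushed when popping (i,j), in pop order (= A's neighbour order)
def pushesVs (noircies : List (Int × Int)) (n m : Int) (i j : Int)
    (vs : List (Int × Int)) : List (Int × Int) :=
  vs.filterMap (fun ab =>
    if 0 ≤ i + ab.1 ∧ i + ab.1 < n ∧ 0 ≤ j + ab.2 ∧ j + ab.2 < m ∧
        (i + ab.1, j + ab.2) ∉ noircies then some (i + ab.1, j + ab.2) else none)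

def muU (U : Finset (Int × Int)) (s : List (Int × Int)) : Nat := (U \ s.toFinset).card

lemma toFinset_setAdd (s : List (Int × Int)) (x : Int × Int) :
    (PySem.Set.add s x).toFinset = insert x s.toFinset := by
  simp only [PySem.Set.add, PySem.Set.contains]
  split_ifs with h
  · rw [Finset.insert_eq_self.2]
    simpa using h
  · simp [List.toFinset_append]

lemma mem_setAdd (s : List (Int × Int)) (x y : Int × Int) :
    y ∈ PySem.Set.add s x ↔ y ∈ s ∨ y = x := PySem.Set.mem_add s x y

lemma muU_mono (U : Finset (Int × Int)) {s t : List (Int × Int)} (h : s ⊆ t) :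
    muU U t ≤ muU U s := by
  apply Finset.card_le_card
  apply Finset.sdiff_subset_sdiff (Finset.Subset.refl U)
  intro x hx; simp only [List.mem_toFinset] at *; exact h hx

lemma muU_add_lt (U : Finset (Int × Int)) {s : List (Int × Int)} {x : Int × Int}
    (hx : x ∈ U) (hxs : x ∉ s) : muU U (PySem.Set.add s x) + 1 = muU U s := by
  unfold muU
  rw [toFinset_setAdd, Finset.sdiff_insert, Finset.card_erase_of_mem (by simp [hx, hxs]),
    Nat.sub_add_cancel (Finset.card_pos.2 ⟨x, by simp [hx, hxs]⟩)]

-- monotonicity + boundedness of aideA's set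
lemma aideA_grow (noircies : List (Int × Int)) (n m : Int) (U : Finset (Int × Int))
    (hU : ∀ a b : Int, 0 ≤ a → a < n → 0 ≤ b → b < m → ((a, b) : Int × Int) ∈ U) :
    ∀ f, (∀ i j s r, aideA noircies n m f i j s = some r →
      s ⊆ r ∧ ((i, j) ∈ U → s.toFinset ⊆ U → r.toFinset ⊆ U)) := by
  intro f
  induction f with
  | zero => intro i j s r h; simp [aideA] at h
  | succ f ih =>
    have fold : ∀ vs i j s r, aideFoldA noircies n m (aideA noircies n m f) i j vs s = some r →
        s ⊆ r ∧ (s.toFinset ⊆ U → r.toFinset ⊆ U) := by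
      intro vs
      induction vs with
      | nil =>
        intro i j s r h
        simp only [aideFoldA, Option.some.injEq] at h
        subst h; exact ⟨List.Subset.refl _, fun h => h⟩
      | cons ab vs ihv =>
        intro i j s r h
        obtain ⟨a, b⟩ := ab
        simp only [aideFoldA] at h
        split_ifs at h with h1 h2
        · cases hrec : aideA noircies n m f (i+a) (j+b) s with
          | none => rw [hrec] at h; simp at h
          | some s' =>
            rw [hrec] at h
            have hA := ih (i+a) (j+b) s s' hrec
            have hF := ihv i j s' r h
            have hvU : ((i+a, j+b) : Int × Int) ∈ U :=
              hU _ _ h1.1 h1.2.1 h1.2.2.1 h1.2.2.2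
            exact ⟨List.Subset.trans hA.1 hF.1,
              fun hs => hF.2 (hA.2 hvU hs)⟩
        · exact ihv i j s r h
        · exact ihv i j s r h
    intro i j s r h
    simp only [aideA] at h
    have hf := fold voisinA i j (PySem.Set.add s (i, j)) r h
    constructor
    · intro x hx; exact hf.1 ((mem_setAdd s (i, j) x).2 (Or.inl hx))
    · intro hiU hsU
      apply hf.2
      rw [toFinset_setAdd]
      exact Finset.insert_subset hiU hsU

-- totality of aideA at sufficient fuel
lemma aideA_total (noircies : List (Int × Int)) (n m : Int) (U : Finset (Int × Int))
    (hU : ∀ a b : Int, 0 ≤ a → a < n → 0 ≤ b → b < m → ((a, b) : Int × Int) ∈ U) :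
    ∀ f, (∀ i j s, (i, j) ∈ U → (i, j) ∉ s → s.toFinset ⊆ U → muU U s < f →
      (aideA noircies n m f i j s).isSome) := by
  intro f
  induction f with
  | zero => intro i j s _ _ _ hmu; omega
  | succ f ih =>
    intro i j s hiU his hsU hmu
    simp only [aideA]
    have hadd := muU_add_lt U hiU his
    have fold : ∀ vs s', s'.toFinset ⊆ U → muU U s' < f →
        (aideFoldA noircies n m (aideA noircies n m f) i j vs s').isSome := by
      intro vs
      induction vs with
      | nil => intro s' _ _; simp [aideFoldA]
      | cons ab vs ihv =>
        intro s' hU' hmu'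
        obtain ⟨a, b⟩ := ab
        simp only [aideFoldA]
        split_ifs with h1 h2
        · have hvU : ((i+a, j+b) : Int × Int) ∈ U :=
            hU _ _ h1.1 h1.2.1 h1.2.2.1 h1.2.2.2
          have hsome := ih (i+a) (j+b) s' hvU h2.2 hU' hmu'
          cases hrec : aideA noircies n m f (i+a) (j+b) s' with
          | none => rw [hrec] at hsome; simp at hsome
          | some s'' =>
            have hg := aideA_grow noircies n m U hU f (i+a) (j+b) s' s'' hrec
            exact ihv s'' (hg.2 hvU hU') (lt_of_le_of_lt (muU_mono U hg.1) hmu')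
        · exact ihv s' hU' hmu'
        · exact ihv s' hU' hmu'
    apply fold voisinA
    · rw [toFinset_setAdd]; exact Finset.insert_subset hiU hsU
    · omega

lemma floodB_fuelMono (blocked : PySem.Set (Int × Int)) (n m : Int) :
    ∀ f stack seen r, floodB blocked n m f stack seen = some r →
      floodB blocked n m (f+1) stack seen = some r := by
  intro f
  induction f with
  | zero => intro stack seen r h; simp [floodB] at h
  | succ f ih =>
    intro stack seen r h
    match stack with
    | [] => simpa [floodB] using h
    | (i, j) :: rest =>
      simp only [floodB] at h ⊢
      split_ifs at h ⊢ with hm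
      · exact ih rest seen r h
      · exact ih _ _ r h

lemma floodB_fuelLe (blocked : PySem.Set (Int × Int)) (n m : Int)
    {f g : Nat} (h : f ≤ g) :
    ∀ stack seen r, floodB blocked n m f stack seen = some r →
      floodB blocked n m g stack seen = some r := by
  induction g, h using Nat.le_induction with
  | base => intro stack seen r h; exact h
  | succ p hp ih => intro stack seen r h; exact floodB_fuelMono blocked n m p stack seen r (ih stack seen r h)

-- the stack built by Source B's inner push loop
lemma stack1_eq (noircies : List (Int × Int)) (n m : Int) (i j : Int)
    (rest : List (Int × Int)) :
    revVoisinB.foldl (fun st ab =>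
        if 0 ≤ i + ab.1 ∧ i + ab.1 < n ∧ 0 ≤ j + ab.2 ∧ j + ab.2 < m ∧
            (i + ab.1, j + ab.2) ∉ PySem.Set.ofList noircies
        then (i + ab.1, j + ab.2) :: st else st) rest
      = pushesVs noircies n m i j voisinA ++ rest := by
  simp only [revVoisinB, voisinA, pushesVs, List.foldl_cons, List.foldl_nil,
    List.filterMap_cons, List.filterMap_nil, PySem.Set.mem_ofList]
  norm_num
  split_ifs <;> simp

lemma pushesVs_cons (noircies : List (Int × Int)) (n m : Int) (i j a b : Int)
    (vs : List (Int × Int)) :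
    pushesVs noircies n m i j ((a, b) :: vs)
      = (if 0 ≤ i + a ∧ i + a < n ∧ 0 ≤ j + b ∧ j + b < m ∧ (i + a, j + b) ∉ noircies
         then [(i + a, j + b)] else []) ++ pushesVs noircies n m i j vs := by
  simp only [pushesVs, List.filterMap_cons]
  split_ifs <;> simp

lemma pushesVs_len (noircies : List (Int × Int)) (n m : Int) (i j : Int)
    (vs : List (Int × Int)) : (pushesVs noircies n m i j vs).length ≤ vs.length :=
  List.length_filterMap_le _ _

lemma pushesVs_mem (noircies : List (Int × Int)) (n m : Int) (i j : Int)
    (vs : List (Int × Int)) (U : Finset (Int × Int))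
    (hU : ∀ a b : Int, 0 ≤ a → a < n → 0 ≤ b → b < m → ((a, b) : Int × Int) ∈ U) :
    ∀ u ∈ pushesVs noircies n m i j vs, u ∈ U := by
  intro u hu
  simp only [pushesVs, List.mem_filterMap] at hu
  obtain ⟨ab, _, heq⟩ := hu
  split_ifs at heq with hc
  cases heq
  exact hU _ _ hc.1 hc.2.1 hc.2.2.1 hc.2.2.2.1

-- totality of floodB at sufficient fuel
lemma floodB_total (noircies : List (Int × Int)) (n m : Int) (U : Finset (Int × Int))
    (hU : ∀ a b : Int, 0 ≤ a → a < n → 0 ≤ b → b < m → ((a, b) : Int × Int) ∈ U) :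
    ∀ f stack seen, (∀ u ∈ stack, u ∈ U) → 5 * muU U seen + stack.length < f →
      (floodB (PySem.Set.ofList noircies) n m f stack seen).isSome := by
  intro f
  induction f with
  | zero => intro stack seen _ hf; omega
  | succ f ih =>
    intro stack seen hst hf
    match stack with
    | [] => simp [floodB]
    | (i, j) :: rest =>
      by_cases hm : ((i, j) : Int × Int) ∈ seen
      · simp only [floodB, if_pos hm]
        apply ih rest seen (fun u hu => hst u (by simp [hu]))
        simp only [List.length_cons] at hf; omega
      · simp only [floodB, if_neg hm]
        rw [stack1_eq]
        have h1 := muU_add_lt U (hst (i, j) (by simp)) hm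
        have h2 : (pushesVs noircies n m i j voisinA).length ≤ 4 := by
          exact pushesVs_len noircies n m i j voisinA
        apply ih
        · intro u hu
          rcases List.mem_append.1 hu with h | h
          · exact pushesVs_mem noircies n m i j voisinA U hU u h
          · exact hst u (by simp [h])
        · simp only [List.length_append, List.length_cons] at hf ⊢
          omega

-- the simulation: popping (i,j) and then draining its pushes does to the seen set
-- exactly what one recursive call of aide_connexe does
lemma simAB (noircies : List (Int × Int)) (n m : Int) :
    ∀ f, (∀ i j s r, aideA noircies n m f i j s = some r → (i, j) ∉ s →
      ∀ rest g out, floodB (PySem.Set.ofList noircies) n m g rest r = some out →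
        ∃ h, floodB (PySem.Set.ofList noircies) n m h ((i, j) :: rest) s = some out) := by
  intro f
  induction f with
  | zero => intro i j s r h; simp [aideA] at h
  | succ f ih =>
    have foldSim : ∀ vs i j s r, aideFoldA noircies n m (aideA noircies n m f) i j vs s = some r →
        ∀ rest g out, floodB (PySem.Set.ofList noircies) n m g rest r = some out →
          ∃ h', floodB (PySem.Set.ofList noircies) n m h'
            (pushesVs noircies n m i j vs ++ rest) s = some out := by
      intro vs
      induction vs with
      | nil =>
        intro i j s r h rest g out hc
        simp only [aideFoldA, Option.some.injEq] at h
        subst h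
        exact ⟨g, by simpa [pushesVs] using hc⟩
      | cons ab vs ihv =>
        intro i j s r h rest g out hc
        obtain ⟨a, b⟩ := ab
        simp only [aideFoldA] at h
        rw [pushesVs_cons]
        split_ifs at h with h1 h2
        · -- A recurses into (i+a, j+b)
          cases hrec : aideA noircies n m f (i+a) (j+b) s with
          | none => rw [hrec] at h; simp at h
          | some s' =>
            rw [hrec] at h
            obtain ⟨g1, hg1⟩ := ihv i j s' r h rest g out hc
            obtain ⟨g2, hg2⟩ := ih (i+a) (j+b) s s' hrec h2.2 _ g1 out hg1
            refine ⟨g2, ?_⟩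
            rw [if_pos ⟨h1.1, h1.2.1, h1.2.2.1, h1.2.2.2, h2.1⟩]
            exact hg2
        · -- in bounds but not explored: either blackened (not pushed) or already seen
          by_cases hb : ((i + a, j + b) : Int × Int) ∈ noircies
          · rw [if_neg (fun hc' => hc'.2.2.2.2 hb)]
            simpa using ihv i j s r h rest g out hc
          · have hmem : ((i + a, j + b) : Int × Int) ∈ s := by
              by_contra hns; exact h2 ⟨hb, hns⟩
            rw [if_pos ⟨h1.1, h1.2.1, h1.2.2.1, h1.2.2.2, hb⟩]
            obtain ⟨g1, hg1⟩ := ihv i j s r h rest g out hc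
            refine ⟨g1 + 1, ?_⟩
            simp only [List.cons_append, floodB, if_pos hmem]
            exact hg1
        · rw [if_neg (by intro hc'; exact h1 ⟨hc'.1, hc'.2.1, hc'.2.2.1, hc'.2.2.2.1⟩)]
          simpa using ihv i j s r h rest g out hc
    intro i j s r h his rest g out hc
    simp only [aideA] at h
    obtain ⟨g1, hg1⟩ := foldSim voisinA i j (PySem.Set.add s (i, j)) r h rest g out hc
    refine ⟨g1 + 1, ?_⟩
    simp only [floodB, if_neg his]
    rw [stack1_eq]
    exact hg1

-- the two start-search loops are the same loop
lemma startAB (noircies : List (Int × Int)) (m : Int) :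
    ∀ f i j, startA noircies m f i j = startB noircies m f i j := by
  intro f
  induction f with
  | zero => intro i j; rfl
  | succ f ih =>
    intro i j
    simp only [startA, startB]
    split_ifs <;> simp [ih]

-- ===== VERDICT (by name: the statement is the Claim_ definition above) =====
theorem connexe_spec : Claim_equal_connexe := by
  intro grille noircies _ _
  unfold Spec_connexe
  set n : Int := (grille.length : Int) with hn
  set m : Int := ((grille.headD []).length : Int) with hm
  set bl := PySem.Set.ofList noircies with hbl
  have hstart : startB noircies m (noircies.length + 1) 0 0
      = startA noircies m (noircies.length + 1) 0 0 :=
    (startAB noircies m (noircies.length + 1) 0 0).symm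
  set st := startA noircies m (noircies.length + 1) 0 0 with hstdef
  set U : Finset (Int × Int) :=
    insert st ((Finset.Icc (0:Int) (n-1)) ×ˢ (Finset.Icc (0:Int) (m-1))) with hUdef
  have hU : ∀ a b : Int, 0 ≤ a → a < n → 0 ≤ b → b < m → ((a, b) : Int × Int) ∈ U := by
    intro a b h1 h2 h3 h4
    apply Finset.mem_insert_of_mem
    rw [Finset.mem_product]
    constructor <;> rw [Finset.mem_Icc] <;> omega
  have hstU : st ∈ U := Finset.mem_insert_self _ _
  have hcard : U.card ≤ grille.length * (grille.headD []).length + 1 := by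
    calc U.card ≤ ((Finset.Icc (0:Int) (n-1)) ×ˢ (Finset.Icc (0:Int) (m-1))).card + 1 :=
          Finset.card_insert_le _ _
      _ = grille.length * (grille.headD []).length + 1 := by
          rw [Finset.card_product, Int.card_Icc, Int.card_Icc, hn, hm]
          simp
  have hmuE : muU U ([] : List (Int × Int)) = U.card := by simp [muU]
  have hA := aideA_total noircies n m U hU
      (grille.length * (grille.headD []).length + 2) st.1 st.2 []
      (by simpa using hstU) (by simp) (by simp) (by omega)
  obtain ⟨rA, hrA⟩ := Option.isSome_iff_exists.mp hA
  have hB := floodB_total noircies n m U hU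
      (5 * (grille.length * (grille.headD []).length) + 7) [st] []
      (by intro u hu; simp only [List.mem_singleton] at hu; exact hu ▸ hstU)
      (by simp only [List.length_cons, List.length_nil]; omega)
  obtain ⟨rB, hrB⟩ := Option.isSome_iff_exists.mp hB
  have hcont : floodB bl n m 1 [] rA = some rA := rfl
  obtain ⟨g, hg⟩ := simAB noircies n m
      (grille.length * (grille.headD []).length + 2) st.1 st.2 [] rA hrA (by simp)
      [] 1 rA hcont
  have hg' : floodB bl n m (max g (5 * (grille.length * (grille.headD []).length) + 7))
      [st] [] = some rA :=
    floodB_fuelLe bl n m (le_max_left _ _) _ _ _ (by simpa using hg)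
  have hr' : floodB bl n m (max g (5 * (grille.length * (grille.headD []).length) + 7))
      [st] [] = some rB :=
    floodB_fuelLe bl n m (le_max_right _ _) _ _ _ hrB
  have hAB : rA = rB := by
    rw [hg'] at hr'; exact Option.some.inj hr'
  show (if (((aideA noircies n m (grille.length * (grille.headD []).length + 2)
        st.1 st.2 []).getD []).length : Int) + (noircies.length : Int) = n * m
      then true else false)
    = decide ((((floodB bl n m (5 * (grille.length * (grille.headD []).length) + 7)
        [startB noircies m (noircies.length + 1) 0 0] []).getD []).length : Int)
        + (noircies.length : Int) = n * m)
  rw [hstart, hrA, hrB, hAB]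
  by_cases hc : ((rB.length : Int) + (noircies.length : Int) = n * m)
  · simp [hc]
  · simp [hc]
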